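-- pv_equiv track=rewrite | github.com/lori-super/prescription-generation | main.py | make_batches
-- ===== SOURCE A (Python) =====
-- def padding(sequence, length):
--     sequence = sequence[:length]
--     while len(sequence) < length:
--         sequence.append(0)
--     return sequence
--
-- def make_batches(data, batch_size):
--     batch_num = len(data) // batch_size if len(data) % batch_size == 0 else len(data) // batch_size + 1
--     batches = []
--     for batch in range(batch_num):
--         mini_batch = data[batch * batch_size:(batch + 1) * batch_size]
--         en_max_len = max([len(p[0]) for p in mini_batch])
--         de_max_len = max([len(p[1]) for p in mini_batch])
--         key_max_len = max([len(p[2]) for p in mini_batch])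
--         en_mini_batch = [padding(p[0], en_max_len) for p in mini_batch]
--         de_mini_batch = [padding(p[1], de_max_len) for p in mini_batch]
--         key_mini_batch = [padding(p[2], key_max_len) for p in mini_batch]
--         batches.append((en_mini_batch, de_mini_batch, key_mini_batch))
--
--     return batches
-- ===== SOURCE B (Python) =====
-- def _pad_column(column):
--     length = max(map(len, column))
--     return [[s[i] if i < len(s) else 0 for i in range(length)] for s in column]
--
--
-- def _flush(group):
--     en, de, key = zip(*group)
--     return (_pad_column(en), _pad_column(de), _pad_column(key))
--
--
-- def make_batches(data, batch_size):
--     batches = []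
--     group = []
--     for p in data:
--         group.append(p)
--         if len(group) == batch_size:
--             batches.append(_flush(group))
--             group = []
--     if group:
--         batches.append(_flush(group))
--     return batches
-- ===== Notes on version B (the rewrite author's own statement) =====
-- stated objective: alternative
-- what changed: B replaces A's batch-count computation and index/slice chunking by a single streaming pass with a group accumulator flushed when full, transposes each batch with zip into three columns handled by one generic column padder, and pads by an index-based comprehension instead of A's truncate-then-while-append loop.
-- outside the precondition, e.g. on make_batches([([1], [2], [3])], -2): A returns [], B returns [([[1]], [[2]], [[3]])]; on make_batches([([1], [2], [3])], 0): A raises ZeroDivisionError, B returns [([[1]], [[2]], [[3]])]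
import Mathlib
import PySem

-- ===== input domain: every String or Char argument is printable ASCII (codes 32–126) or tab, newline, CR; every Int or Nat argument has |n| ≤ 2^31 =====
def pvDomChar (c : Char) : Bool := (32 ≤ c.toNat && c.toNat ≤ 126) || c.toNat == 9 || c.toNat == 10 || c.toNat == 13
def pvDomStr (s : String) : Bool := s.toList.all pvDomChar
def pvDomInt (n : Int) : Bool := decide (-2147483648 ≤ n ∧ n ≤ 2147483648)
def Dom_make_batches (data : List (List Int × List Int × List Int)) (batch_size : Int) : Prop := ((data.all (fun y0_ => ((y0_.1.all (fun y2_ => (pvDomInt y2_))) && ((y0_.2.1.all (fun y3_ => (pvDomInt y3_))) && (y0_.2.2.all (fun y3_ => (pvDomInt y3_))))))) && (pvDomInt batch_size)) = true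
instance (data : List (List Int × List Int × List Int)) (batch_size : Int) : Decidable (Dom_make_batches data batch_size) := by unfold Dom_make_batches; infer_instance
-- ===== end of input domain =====

-- B replaces A's batch-count/slice chunking by one streaming pass with a group accumulator flushed
-- when full, and pads each transposed column with an index-based comprehension (alternative; same cost).

-- ===== PORT A =====

-- Python max(list of ints); `.getD 0` is unreachable: under Pre_ every mini_batch is nonempty.
def pyMaxI (xs : List Int) : Int := (PySem.List.max? xs (fun x => x)).getD 0

-- A's `padding` while-loop: `while len(sequence) < length: sequence.append(0)`.
def paddingLoop (sequence : List Int) (length : Int) : List Int :=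
  if (sequence.length : Int) < length then paddingLoop (sequence ++ [0]) length else sequence
termination_by (length - sequence.length).toNat
decreasing_by simp only [List.length_append, List.length_cons, List.length_nil]; omega

-- A's `padding`: sequence = sequence[:length], then the while-append loop.
def padding (sequence : List Int) (length : Int) : List Int :=
  paddingLoop (PySem.List.slice sequence none (some length)) length

-- A's loop body for one value of `batch`.
def batchA (data : List (List Int × List Int × List Int)) (batch_size batch : Int) :
    List (List Int) × List (List Int) × List (List Int) :=
  let mini_batch := PySem.List.slice data (some (batch * batch_size)) (some ((batch + 1) * batch_size))
  let en_max_len := pyMaxI (mini_batch.map (fun p => (p.1.length : Int)))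
  let de_max_len := pyMaxI (mini_batch.map (fun p => (p.2.1.length : Int)))
  let key_max_len := pyMaxI (mini_batch.map (fun p => (p.2.2.length : Int)))
  (mini_batch.map (fun p => padding p.1 en_max_len),
   mini_batch.map (fun p => padding p.2.1 de_max_len),
   mini_batch.map (fun p => padding p.2.2 key_max_len))

def make_batches (data : List (List Int × List Int × List Int)) (batch_size : Int) : List (List (List Int) × List (List Int) × List (List Int)) :=
  let batch_num : Int :=
    if PySem.Int.mod (data.length : Int) batch_size = 0 then
      PySem.Int.floordiv (data.length : Int) batch_size
    else
      PySem.Int.floordiv (data.length : Int) batch_size + 1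
  (PySem.List.pyRange 0 batch_num 1).foldl
    (fun batches batch => batches ++ [batchA data batch_size batch]) []

-- ===== PORT B =====

-- B's `_pad_column`: length = max(map(len, column)); pad each row by an index comprehension.
def padColumn (column : List (List Int)) : List (List Int) :=
  let length := pyMaxI (column.map (fun s => (s.length : Int)))
  column.map (fun s =>
    (PySem.List.pyRange 0 length 1).map
      (fun i => if i < (s.length : Int) then (PySem.List.pyGet? s i).getD 0 else 0))

-- B's `_flush`: zip(*group) transposes the group into its three columns.
def flushB (group : List (List Int × List Int × List Int)) :
    List (List Int) × List (List Int) × List (List Int) :=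
  let en := group.map (fun p => p.1)
  let de := group.map (fun p => p.2.1)
  let key := group.map (fun p => p.2.2)
  (padColumn en, padColumn de, padColumn key)

-- B's single streaming pass: accumulate a group, flush when it reaches batch_size, flush the rest.
def make_batches_alt (data : List (List Int × List Int × List Int)) (batch_size : Int) : List (List (List Int) × List (List Int) × List (List Int)) :=
  let st := data.foldl
    (fun (acc : List (List (List Int) × List (List Int) × List (List Int)) × List (List Int × List Int × List Int)) p =>
      let group := acc.2 ++ [p]
      if (group.length : Int) = batch_size then (acc.1 ++ [flushB group], []) else (acc.1, group))
    ([], [])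
  if st.2 = [] then st.1 else st.1 ++ [flushB st.2]

-- ===== PRECONDITION & SPEC =====
-- Pre_ restricts to positive batch_size, the natural domain: at batch_size = 0 A raises
-- ZeroDivisionError, and for negative batch_size A's [] is an artefact of its ceil formula
-- (it slices nothing) while B's streaming pass groups the whole data into one batch.
def Pre_make_batches (data : List (List Int × List Int × List Int)) (batch_size : Int) : Prop := 0 < batch_size
instance (data : List (List Int × List Int × List Int)) (batch_size : Int) : Decidable (Pre_make_batches data batch_size) := by unfold Pre_make_batches; infer_instance

def pvWitness_make_batches : (List (List Int × List Int × List Int)) × Int := ([([1], [2, 3], [4])], 1)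

def Spec_make_batches (data : List (List Int × List Int × List Int)) (batch_size : Int) (out : List (List (List Int) × List (List Int) × List (List Int))) : Prop := out = make_batches_alt data batch_size
instance (data : List (List Int × List Int × List Int)) (batch_size : Int) (out : List (List (List Int) × List (List Int) × List (List Int))) : Decidable (Spec_make_batches data batch_size out) := by unfold Spec_make_batches; infer_instance

-- ===== CLAIM (what is proved, stated in full; the proofs are below) =====
def Claim_equal_make_batches : Prop := ∀ (data : List (List Int × List Int × List Int)) (batch_size : Int), Dom_make_batches data batch_size → Pre_make_batches data batch_size → Spec_make_batches data batch_size (make_batches data batch_size)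

-- ===== LEMMAS AND PROOFS =====

-- Proof-side view of A's loop body applied to an already-cut mini-batch.
def flushACore (mini_batch : List (List Int × List Int × List Int)) :
    List (List Int) × List (List Int) × List (List Int) :=
  let en_max_len := pyMaxI (mini_batch.map (fun p => (p.1.length : Int)))
  let de_max_len := pyMaxI (mini_batch.map (fun p => (p.2.1.length : Int)))
  let key_max_len := pyMaxI (mini_batch.map (fun p => (p.2.2.length : Int)))
  (mini_batch.map (fun p => padding p.1 en_max_len),
   mini_batch.map (fun p => padding p.2.1 de_max_len),
   mini_batch.map (fun p => padding p.2.2 key_max_len))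

-- Chunks of size m+1 (the last one possibly shorter).
def chunks {α : Type} (m : Nat) (l : List α) : List (List α) :=
  if h : l = [] then [] else l.take (m + 1) :: chunks m (l.drop (m + 1))
termination_by l.length
decreasing_by
  simp only [List.length_drop]
  have : 0 < l.length := List.length_pos_of_ne_nil h
  omega

-- Full chunks of size m+1 together with the final partial group (possibly []).
def splitFull {α : Type} (m : Nat) (l : List α) : List (List α) × List α :=
  if h : l.length < m + 1 then ([], l)
  else
    let r := splitFull m (l.drop (m + 1))
    (l.take (m + 1) :: r.1, r.2)
termination_by l.length
decreasing_by simp only [List.length_drop]; omega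

theorem splitFull_chunks {α : Type} (m : Nat) (l : List α) :
    (splitFull m l).1 ++ (if (splitFull m l).2 = [] then [] else [(splitFull m l).2]) = chunks m l := by
  induction l using splitFull.induct (m := m) with
  | case1 l h =>
    rw [splitFull, dif_pos h]
    by_cases hl : l = []
    · simp [hl, chunks]
    · rw [chunks, dif_neg hl]
      have ht : l.take (m + 1) = l := List.take_of_length_le (by omega)
      have hd : l.drop (m + 1) = [] := List.drop_eq_nil_of_le (by omega)
      rw [ht, hd, chunks, dif_pos rfl]
      simp [hl]
  | case2 l h ih =>
    rw [splitFull, dif_neg h]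
    rw [chunks, dif_neg (by intro hl; subst hl; simp at h)]
    simpa using congrArg (l.take (m + 1) :: ·) ih

-- The streaming fold, started on a partial group, produces the full chunks of (g ++ l) and the rest.
theorem foldB_eq {α β : Type} (m : Nat) (f : List α → β) (l : List α) :
    ∀ (g : List α) (B : List β), g.length ≤ m →
    l.foldl (fun acc p =>
        let group := acc.2 ++ [p]
        if (group.length : Int) = ((m : Int) + 1) then (acc.1 ++ [f group], ([] : List α))
        else (acc.1, group))
      (B, g)
    = (B ++ ((splitFull m (g ++ l)).1).map f, (splitFull m (g ++ l)).2) := by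
  induction l with
  | nil =>
    intro g B hg
    rw [List.foldl_nil, List.append_nil, splitFull, dif_pos (by omega)]
    simp
  | cons p rest ih =>
    intro g B hg
    rw [List.foldl_cons]
    by_cases hfull : (g ++ [p]).length = m + 1
    · simp only [hfull]
      rw [if_pos (by push_cast; ring)]
      rw [ih [] (B ++ [f (g ++ [p])]) (by simp)]
      have hsp : splitFull m (g ++ p :: rest) = ((g ++ [p]) :: (splitFull m rest).1, (splitFull m rest).2) := by
        have hlen : (g ++ p :: rest).length = (m + 1) + rest.length := by
          simp at hfull ⊢; omega
        have heq : g ++ p :: rest = (g ++ [p]) ++ rest := by simp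
        rw [splitFull, dif_neg (by omega)]
        rw [heq, ← hfull, List.take_left, List.drop_left]
      rw [hsp]
      simp
    · rw [if_neg (by intro hc; exact hfull (by exact_mod_cast hc))]
      rw [ih (g ++ [p]) B (by simp at hfull ⊢; omega)]
      have heq : (g ++ [p]) ++ rest = g ++ p :: rest := by simp
      rw [heq]

-- B computes flushB over all chunks (size bs = m+1, last possibly short).
theorem B_eq_chunks (m : Nat) (data : List (List Int × List Int × List Int)) :
    make_batches_alt data ((m : Int) + 1) = (chunks m data).map flushB := by
  unfold make_batches_alt
  rw [foldB_eq m flushB data [] [] (by simp)]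
  simp only [List.nil_append]
  rw [← splitFull_chunks m data, List.map_append]
  by_cases h2 : (splitFull m data).2 = []
  · simp [h2]
  · simp [h2]

-- pyMaxI of a list of nonnegative integers is nonnegative.
theorem pyMaxI_nonneg (l : List Int) (h : ∀ x ∈ l, 0 ≤ x) : 0 ≤ pyMaxI l := by
  unfold pyMaxI
  cases hmx : PySem.List.max? l (fun x => x) with
  | none => simp
  | some mx => simpa using h mx (PySem.List.max?_mem hmx)

-- A's while-append loop in closed form.
theorem paddingLoop_eq (L : Int) (s : List Int) :
    paddingLoop s L = s ++ List.replicate (L - (s.length : Int)).toNat 0 := by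
  generalize hk : (L - (s.length : Int)).toNat = k
  induction k generalizing s with
  | zero =>
    rw [paddingLoop, if_neg (by omega)]
    simp
  | succ k ih =>
    rw [paddingLoop, if_pos (by omega)]
    rw [ih (s ++ [0]) (by simp only [List.length_append, List.length_cons, List.length_nil]; omega)]
    rw [List.append_assoc, List.replicate_succ]
    rfl

-- For a nonnegative target length, A's padding equals B's index-based comprehension.
theorem padding_eq_rangePad (s : List Int) (L : Int) (hL : 0 ≤ L) :
    padding s L
      = (PySem.List.pyRange 0 L 1).map
          (fun i => if i < (s.length : Int) then (PySem.List.pyGet? s i).getD 0 else 0) := by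
  unfold padding
  rw [paddingLoop_eq, PySem.List.slice_to s hL, PySem.List.pyRange_one]
  apply List.ext_getElem
  · simp only [List.length_append, List.length_take, List.length_replicate, List.length_map,
      List.length_range]
    omega
  · intro j h1 h2
    simp only [List.length_map, List.length_range] at h2
    have h2' : j < L.toNat := by omega
    simp only [List.getElem_map, List.getElem_range, zero_add, PySem.List.pyGet?_natCast]
    simp only [List.length_append, List.length_take, List.length_replicate] at h1
    rw [List.getElem_append]
    split
    · next hlt =>
      simp only [List.length_take] at hlt
      rw [List.getElem_take]
      rw [if_pos (by exact_mod_cast (by omega : j < s.length))]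
      rw [List.getElem?_eq_getElem (by omega)]
      rfl
    · next hge =>
      simp only [List.length_take] at hge
      rw [List.getElem_replicate]
      rw [if_neg (by omega)]

-- A's per-index batch equals the per-chunk view on the corresponding slice.
theorem batchA_core (data : List (List Int × List Int × List Int)) (bs i : Int) :
    batchA data bs i = flushACore (PySem.List.slice data (some (i * bs)) (some ((i + 1) * bs))) := rfl

-- Shifting A's batch index by one skips the first chunk.
theorem batchA_shift (m : Nat) (data : List (List Int × List Int × List Int)) (i : Nat) :
    batchA data ((m : Int) + 1) ((i : Int) + 1) = batchA (data.drop (m + 1)) ((m : Int) + 1) (i : Int) := by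
  rw [batchA_core, batchA_core]
  have e1 : ((i : Int) + 1) * ((m : Int) + 1) = (((i + 1) * (m + 1) : Nat) : Int) := by push_cast; ring
  have e2 : ((i : Int) + 1 + 1) * ((m : Int) + 1) = (((i + 2) * (m + 1) : Nat) : Int) := by push_cast; ring
  have e3 : (i : Int) * ((m : Int) + 1) = ((i * (m + 1) : Nat) : Int) := by push_cast; ring
  rw [e1, e2, e3, PySem.List.slice_natCast, PySem.List.slice_natCast, List.drop_drop]
  have h1 : (i + 1) * (m + 1) = i * (m + 1) + (m + 1) := by ring
  have h2 : (i + 2) * (m + 1) = i * (m + 1) + (m + 1) + (m + 1) := by ring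
  rw [show (i + 2) * (m + 1) - (i + 1) * (m + 1) = m + 1 by omega,
      show (i + 1) * (m + 1) - i * (m + 1) = m + 1 by omega,
      show m + 1 + i * (m + 1) = (i + 1) * (m + 1) by ring]

-- A's range of batches computes flushACore over the chunks.
theorem A_eq_chunks (m : Nat) : ∀ (n : Nat) (data : List (List Int × List Int × List Int)),
    data.length ≤ n →
    (List.range ((data.length + m) / (m + 1))).map (fun (i : Nat) => batchA data ((m : Int) + 1) (i : Int))
      = (chunks m data).map flushACore := by
  intro n
  induction n with
  | zero =>
    intro data hlen
    have : data = [] := List.eq_nil_of_length_eq_zero (by omega)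
    subst this
    rw [chunks, dif_pos rfl]
    simp [Nat.div_eq_of_lt (by omega : m < m + 1)]
  | succ n ih =>
    intro data hlen
    by_cases hnil : data = []
    · subst hnil
      rw [chunks, dif_pos rfl]
      simp [Nat.div_eq_of_lt (by omega : m < m + 1)]
    · have hpos : 0 < data.length := List.length_pos_of_ne_nil hnil
      have hL' : (data.drop (m + 1)).length = data.length - (m + 1) := by simp
      have hdivs : (data.length + m) / (m + 1) = ((data.drop (m + 1)).length + m) / (m + 1) + 1 := by
        rw [hL', show data.length + m = (data.length - 1) + (m + 1) from by omega,
            Nat.add_div_right _ (by omega)]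
        congr 1
        by_cases hge : m + 1 ≤ data.length
        · congr 1; omega
        · rw [Nat.div_eq_of_lt (by omega), Nat.div_eq_of_lt (by omega)]
      rw [hdivs, List.range_succ_eq_map]
      rw [chunks, dif_neg hnil]
      simp only [List.map_cons, List.map_map]
      congr 1
      · -- head: batch 0 is the first chunk
        rw [Nat.cast_zero, batchA_core]
        rw [show (0 : Int) * ((m : Int) + 1) = (((0 : Nat) : Int)) from by simp,
            show ((0 : Int) + 1) * ((m : Int) + 1) = (((m + 1 : Nat) : Int)) from by push_cast; ring]
        rw [PySem.List.slice_natCast]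
        simp
      · -- tail: shift the index and use the induction hypothesis on the dropped list
        have hdroplen : (data.drop (m + 1)).length ≤ n := by
          simp only [List.length_drop]; omega
        rw [← ih (data.drop (m + 1)) hdroplen]
        apply List.map_congr_left
        intro i _
        simp only [Function.comp]
        rw [show ((Nat.succ i : Nat) : Int) = (i : Int) + 1 from by push_cast; ring]
        exact batchA_shift m data i

-- ceil(n / bs) for positive bs equals A's batch_num expression.
theorem batch_num_eq_ceil (n bs : Int) (hbs : 0 < bs) :
    (if PySem.Int.mod n bs = 0 then PySem.Int.floordiv n bs else PySem.Int.floordiv n bs + 1)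
      = (n + bs - 1) / bs := by
  rw [PySem.Int.mod_eq_emod_of_pos (a := n) hbs, PySem.Int.floordiv_eq_ediv_of_pos (a := n) hbs]
  have hdm : n / bs * bs + n % bs = n := by
    have h := Int.emod_add_mul_ediv n bs
    rw [mul_comm bs (n / bs)] at h
    linarith
  have hr0 : 0 ≤ n % bs := Int.emod_nonneg n (by omega)
  have hr1 : n % bs < bs := Int.emod_lt_of_pos n hbs
  by_cases hr : n % bs = 0
  · rw [if_pos hr]
    have h1 : n + bs - 1 = (bs - 1) + n / bs * bs := by linarith
    rw [h1, Int.add_mul_ediv_right (bs - 1) (n / bs) (show bs ≠ 0 by omega),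
        Int.ediv_eq_zero_of_lt (show (0 : Int) ≤ bs - 1 by omega) (show bs - 1 < bs by omega),
        zero_add]
  · rw [if_neg hr]
    have hx : (n / bs + 1) * bs = n / bs * bs + bs := by ring
    have h1 : n + bs - 1 = (n % bs - 1) + (n / bs + 1) * bs := by rw [hx]; linarith
    rw [h1, Int.add_mul_ediv_right (n % bs - 1) (n / bs + 1) (show bs ≠ 0 by omega),
        Int.ediv_eq_zero_of_lt (show (0 : Int) ≤ n % bs - 1 by omega)
          (show n % bs - 1 < bs by omega),
        zero_add]

-- A's per-chunk computation equals B's transposed per-chunk computation.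
theorem flush_eq (c : List (List Int × List Int × List Int)) : flushACore c = flushB c := by
  unfold flushACore flushB padColumn
  simp only [List.map_map]
  refine Prod.ext ?_ (Prod.ext ?_ ?_) <;>
  · apply List.map_congr_left
    intro p _
    apply padding_eq_rangePad
    apply pyMaxI_nonneg
    intro x hx
    simp only [List.mem_map] at hx
    obtain ⟨q, _, hq⟩ := hx
    omega

-- ===== VERDICT (by name: the statement is the Claim_ definition above) =====
theorem make_batches_spec : Claim_equal_make_batches := by
  intro data bs hdom hpre
  unfold Spec_make_batches
  have hpre' : 0 < bs := hpre
  obtain ⟨m, hm⟩ : ∃ m : Nat, bs = (m : Int) + 1 := ⟨(bs - 1).toNat, by omega⟩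
  subst hm
  rw [B_eq_chunks]
  show make_batches data ((m : Int) + 1) = (chunks m data).map flushB
  unfold make_batches
  rw [batch_num_eq_ceil _ _ (by omega)]
  have hc : ((data.length : Int) + ((m : Int) + 1) - 1) / ((m : Int) + 1)
      = (((data.length + m) / (m + 1) : Nat) : Int) := by
    rw [show ((data.length : Int) + ((m : Int) + 1) - 1) = ((data.length + m : Nat) : Int) from by
      push_cast; ring]
    rw [show ((m : Int) + 1) = ((m + 1 : Nat) : Int) from by omega, ← Int.natCast_ediv]
  rw [hc, PySem.List.foldl_append_singleton_eq_map, List.nil_append, PySem.List.pyRange_one]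
  simp only [sub_zero, Int.toNat_natCast, List.map_map, zero_add]
  rw [show (batchA data ((m : Int) + 1) ∘ fun k : Nat => (k : Int))
        = (fun (i : Nat) => batchA data ((m : Int) + 1) (i : Int)) from rfl]
  rw [A_eq_chunks m data.length data le_rfl]
  exact List.map_congr_left (fun c _ => flush_eq c)
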